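-- PySem.lean, part 1 of 3 (source lines 14-168 of 563; lines 411-563 are in no part): sorted / insertBy order lemmas under Mathlib's LinearOrder: the output of sorted is ordered by key, max?/min? bound every element's key.
-- An excerpt: the file's own header and imports are repeated below, and the other parts are separate documents.
import Mathlib.Order.Defs.LinearOrder
import PySemCore

/-!
# PySem — the import surface: PySemCore (every Python-exact primitive and bridge lemma; core-Lean only, kernel-transparent)
# plus the order-theoretic SPEC lemmas of sorted / min? / max?, which need Mathlib's LinearOrder and so live here

PySemCore is core-only (so it compiles in seconds and stays kernel-transparent); the facts a port's PROOF usually needs about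
sorting and extrema are stated here under Mathlib's `LinearOrder` on the key type: the output of `sorted` is ordered by key
(and a permutation — `PySem.List.sorted_perm`), and `max?`/`min?` return an element whose key bounds every element's key.
Cite these by name; do not re-prove them.
-/

namespace PySem.List

variable {α κ : Type} [LinearOrder κ]

theorem insertBy_pairwise_le (key : α → κ) (x : α) (ys : _root_.List α)
    (h : ys.Pairwise (fun a b => key a ≤ key b)) :
    (insertBy (fun a b => decide (key a < key b)) x ys).Pairwise (fun a b => key a ≤ key b) := by
  induction ys with
  | nil => simp [insertBy]
  | cons y ys ih =>
    rw [_root_.List.pairwise_cons] at h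
    obtain ⟨hy, hys⟩ := h
    simp only [insertBy]
    split
    · rename_i hlt
      have hxy : key x < key y := by simpa using hlt
      refine _root_.List.pairwise_cons.mpr ⟨?_, _root_.List.pairwise_cons.mpr ⟨hy, hys⟩⟩
      intro z hz
      rcases _root_.List.mem_cons.mp hz with rfl | hz
      · exact le_of_lt hxy
      · exact le_trans (le_of_lt hxy) (hy z hz)
    · rename_i hnlt
      have hyx : key y ≤ key x := by simpa using hnlt
      refine _root_.List.pairwise_cons.mpr ⟨?_, ih hys⟩
      intro z hz
      rcases (insertBy_mem_iff _ x z ys).mp hz with rfl | hz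
      · exact hyx
      · exact hy z hz

theorem insertBy_pairwise_ge (key : α → κ) (x : α) (ys : _root_.List α)
    (h : ys.Pairwise (fun a b => key b ≤ key a)) :
    (insertBy (fun a b => decide (key b < key a)) x ys).Pairwise (fun a b => key b ≤ key a) := by
  induction ys with
  | nil => simp [insertBy]
  | cons y ys ih =>
    rw [_root_.List.pairwise_cons] at h
    obtain ⟨hy, hys⟩ := h
    simp only [insertBy]
    split
    · rename_i hlt
      have hxy : key y < key x := by simpa using hlt
      refine _root_.List.pairwise_cons.mpr ⟨?_, _root_.List.pairwise_cons.mpr ⟨hy, hys⟩⟩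
      intro z hz
      rcases _root_.List.mem_cons.mp hz with rfl | hz
      · exact le_of_lt hxy
      · exact le_trans (hy z hz) (le_of_lt hxy)
    · rename_i hnlt
      have hyx : key x ≤ key y := by simpa using hnlt
      refine _root_.List.pairwise_cons.mpr ⟨?_, ih hys⟩
      intro z hz
      rcases (insertBy_mem_iff _ x z ys).mp hz with rfl | hz
      · exact hyx
      · exact hy z hz

/-- `sorted(xs, key=key)` is ordered by key (ascending): every earlier element's key ≤ every later one's. -/
theorem sorted_pairwise (xs : _root_.List α) (key : α → κ) :
    (sorted xs key false).Pairwise (fun a b => key a ≤ key b) := by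
  unfold sorted
  simp only [Bool.false_eq_true, ↓reduceIte]
  suffices H : ∀ (acc : _root_.List α), acc.Pairwise (fun a b => key a ≤ key b) →
      (xs.foldl (fun acc x => insertBy (fun a b => decide (key a < key b)) x acc) acc).Pairwise (fun a b => key a ≤ key b) from
    H [] _root_.List.Pairwise.nil
  induction xs with
  | nil => intro acc h; simpa
  | cons x xs ih => intro acc h; simp only [_root_.List.foldl_cons]; exact ih _ (insertBy_pairwise_le key x acc h)

/-- `sorted(xs, key=key, reverse=True)` is ordered by key descending. -/
theorem sorted_pairwise_rev (xs : _root_.List α) (key : α → κ) :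
    (sorted xs key true).Pairwise (fun a b => key b ≤ key a) := by
  unfold sorted
  simp only [↓reduceIte]
  suffices H : ∀ (acc : _root_.List α), acc.Pairwise (fun a b => key b ≤ key a) →
      (xs.foldl (fun acc x => insertBy (fun a b => decide (key b < key a)) x acc) acc).Pairwise (fun a b => key b ≤ key a) from
    H [] _root_.List.Pairwise.nil
  induction xs with
  | nil => intro acc h; simpa
  | cons x xs ih => intro acc h; simp only [_root_.List.foldl_cons]; exact ih _ (insertBy_pairwise_ge key x acc h)

/-- The same fact on the key list: `((sorted xs key).map key).Pairwise (· ≤ ·)` (Mathlib's `Sorted` is this Pairwise). -/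
theorem sorted_map_key_pairwise (xs : _root_.List α) (key : α → κ) : ((sorted xs key false).map key).Pairwise (· ≤ ·) := by
  rw [_root_.List.pairwise_map]; exact sorted_pairwise xs key

/-- `max(xs, key=key)`'s result bounds every element's key from above. -/
theorem max?_isMax {xs : _root_.List α} {key : α → κ} {m : α} (h : max? xs key = some m) : ∀ y ∈ xs, key y ≤ key m := by
  unfold max? at h
  suffices H : ∀ (l : _root_.List α) (acc : Option α) (r : α),
      l.foldl (fun acc x => match acc with | none => some x | some m => if key m < key x then some x else some m) acc = some r →
      (∀ y ∈ l, key y ≤ key r) ∧ (∀ a, acc = some a → key a ≤ key r) from (H xs none m (by simpa using h)).1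
  intro l
  induction l with
  | nil => intro acc r h; simp at h; subst h; simp
  | cons y ys ih =>
    intro acc r h
    simp only [_root_.List.foldl_cons] at h
    have ⟨h1, h2⟩ := ih _ r h
    cases acc with
    | none =>
      refine ⟨fun z hz => ?_, by simp⟩
      rcases _root_.List.mem_cons.mp hz with rfl | hz
      · exact h2 _ rfl
      · exact h1 z hz
    | some a =>
      by_cases hlt : key a < key y
      · have hy : key y ≤ key r := h2 y (by simp [hlt])
        refine ⟨fun z hz => ?_, fun a' ha' => ?_⟩
        · rcases _root_.List.mem_cons.mp hz with rfl | hz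
          · exact hy
          · exact h1 z hz
        · cases ha'; exact le_trans (le_of_lt hlt) hy
      · have ha : key a ≤ key r := h2 a (by simp [hlt])
        refine ⟨fun z hz => ?_, fun a' ha' => ?_⟩
        · rcases _root_.List.mem_cons.mp hz with rfl | hz
          · exact le_trans (not_lt.mp hlt) ha
          · exact h1 z hz
        · cases ha'; exact ha

/-- `min(xs, key=key)`'s result bounds every element's key from below. -/
theorem min?_isMin {xs : _root_.List α} {key : α → κ} {m : α} (h : min? xs key = some m) : ∀ y ∈ xs, key m ≤ key y := by
  unfold min? at h
  suffices H : ∀ (l : _root_.List α) (acc : Option α) (r : α),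
      l.foldl (fun acc x => match acc with | none => some x | some m => if key x < key m then some x else some m) acc = some r →
      (∀ y ∈ l, key r ≤ key y) ∧ (∀ a, acc = some a → key r ≤ key a) from (H xs none m (by simpa using h)).1
  intro l
  induction l with
  | nil => intro acc r h; simp at h; subst h; simp
  | cons y ys ih =>
    intro acc r h
    simp only [_root_.List.foldl_cons] at h
    have ⟨h1, h2⟩ := ih _ r h
    cases acc with
    | none =>
      refine ⟨fun z hz => ?_, by simp⟩
      rcases _root_.List.mem_cons.mp hz with rfl | hz
      · exact h2 _ rfl
      · exact h1 z hz
    | some a =>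
      by_cases hlt : key y < key a
      · have hy : key r ≤ key y := h2 y (by simp [hlt])
        refine ⟨fun z hz => ?_, fun a' ha' => ?_⟩
        · rcases _root_.List.mem_cons.mp hz with rfl | hz
          · exact hy
          · exact h1 z hz
        · cases ha'; exact le_trans hy (le_of_lt hlt)
      · have ha : key r ≤ key a := h2 a (by simp [hlt])
        refine ⟨fun z hz => ?_, fun a' ha' => ?_⟩
        · rcases _root_.List.mem_cons.mp hz with rfl | hz
          · exact le_trans ha (not_lt.mp hlt)
          · exact h1 z hz
        · cases ha'; exact ha

/-- max with the identity key on a linear order: the classic statements. -/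
theorem max?_id_le {xs : _root_.List κ} {m : κ} (h : max? xs (fun x => x) = some m) : ∀ y ∈ xs, y ≤ m := max?_isMax h
theorem min?_id_le {xs : _root_.List κ} {m : κ} (h : min? xs (fun x => x) = some m) : ∀ y ∈ xs, m ≤ y := min?_isMin h

end PySem.List
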